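/- CARRIED OVER by tools/port_base_units.py (renaming only) from proofs.vorbis/Vorbis/Spec/Units, GENERATED there by farm/mkstatement.py from design/units.tsv (unit `range_bad`) and the Specs of Vorbis/Spec/*.lean — do not edit.
   THE STATEMENT of the proof unit `range_bad`: the function `range_bad` (32 instructions) satisfies its contract,
   given the contracts of its callees. What the names mean: Vorbis/Spec/Basic.lean. The theorem to prove:
   `theorem range_bad_ok : ProgX.Base.Spec.range_bad.Statement`. -/
import ProgX.Base.Spec.Runtime
namespace ProgX.Base.Spec.range_bad
open X86 X86.User Asan

/-- The statement of unit `range_bad`. -/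
def Statement : Prop :=
  ∀ (Lay : Layout) (_hLay : Lay.hi = 0x1000000) (μ : Microarch) (_hμ : UserX.MicroOK μ) (u₀ : State)
    (_hcode : HasCodeNat Lay u₀ ProgX.Base.L.range_bad.entry ProgX.Base.Code.code_range_bad.nat ProgX.Base.L.range_bad.size),
    Calls Lay μ ProgX.Base.WayInv (ProgX.Base.conv u₀) ProgX.Base.L.range_bad.entry Asan.rangeBadSpec

end ProgX.Base.Spec.range_bad
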